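-- pv_equiv track=rewrite | github.com/nouralhodayoussef/foundations-cs-python | assignment2, ex2.py | rearrangeLetters
-- ===== SOURCE A (Python) =====
-- def rearrangeLetters(s):
--     upperCase = ""
--     lowerCase = ""
--
--     for char in s:
--         if 'A' <= char <= 'Z':
--             upperCase += char
--         elif 'a' <= char <= 'z':
--             lowerCase += char
--
--     return upperCase + lowerCase
-- ===== SOURCE B (Python) =====
-- def rearrangeLetters(s):
--     letters = [c for c in s if 'A' <= c <= 'Z' or 'a' <= c <= 'z']
--     return ''.join(sorted(letters, key=lambda c: 0 if 'A' <= c <= 'Z' else 1))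
-- ===== Notes on version B (the rewrite author's own statement) =====
-- stated objective: alternative
-- what changed: Replaces the one-pass loop with two string accumulators by filtering the letters once and stably sorting them with a 0/1 case key, so the grouping is done by sort stability instead of manual accumulation.
import Mathlib
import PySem

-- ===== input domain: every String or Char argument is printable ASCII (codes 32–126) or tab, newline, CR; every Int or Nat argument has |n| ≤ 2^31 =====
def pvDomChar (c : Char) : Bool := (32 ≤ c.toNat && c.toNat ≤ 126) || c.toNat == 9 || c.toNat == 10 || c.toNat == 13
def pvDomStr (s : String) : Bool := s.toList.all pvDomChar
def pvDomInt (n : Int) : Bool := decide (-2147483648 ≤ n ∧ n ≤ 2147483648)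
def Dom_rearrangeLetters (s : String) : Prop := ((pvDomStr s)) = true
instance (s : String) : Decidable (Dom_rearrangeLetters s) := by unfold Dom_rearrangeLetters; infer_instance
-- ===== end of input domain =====

-- B groups the letters by a stable sort on a 0/1 case key instead of A's one-pass double accumulation; same exact output.

-- ===== PORT A =====
-- the loop with the two growing strings, as a foldl over the characters with the pair (upperCase, lowerCase)
def rearrangeLetters (s : String) : String :=
  let r := s.toList.foldl
    (fun (acc : List Char × List Char) c =>
      if 'A' ≤ c ∧ c ≤ 'Z' then (acc.1 ++ [c], acc.2)
      else if 'a' ≤ c ∧ c ≤ 'z' then (acc.1, acc.2 ++ [c])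
      else acc)
    ([], [])
  String.ofList (r.1 ++ r.2)

-- ===== PORT B =====
def rearrangeLetters_alt (s : String) : String :=
  let letters := s.toList.filter
    (fun c => decide ('A' ≤ c ∧ c ≤ 'Z') || decide ('a' ≤ c ∧ c ≤ 'z'))
  String.ofList (PySem.List.sorted letters (fun c => if 'A' ≤ c ∧ c ≤ 'Z' then (0 : Int) else 1) false)

-- ===== PRECONDITION & SPEC =====
def Spec_rearrangeLetters (s : String) (out : String) : Prop := out = rearrangeLetters_alt s
instance (s : String) (out : String) : Decidable (Spec_rearrangeLetters s out) := by unfold Spec_rearrangeLetters; infer_instance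

-- ===== CLAIM (what is proved, stated in full; the proofs are below) =====
def Claim_equal_rearrangeLetters : Prop := ∀ (s : String), Dom_rearrangeLetters s → Spec_rearrangeLetters s (rearrangeLetters s)

-- ===== LEMMAS AND PROOFS =====

-- abbreviations used only by the proofs
def pvKey (c : Char) : Int := if 'A' ≤ c ∧ c ≤ 'Z' then 0 else 1
def pvIns (x : Char) (ys : List Char) : List Char :=
  PySem.List.insertBy (fun a b => decide (pvKey a < pvKey b)) x ys

lemma pvKey_cases (c : Char) : pvKey c = 0 ∨ pvKey c = 1 := by
  unfold pvKey; split_ifs <;> simp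

lemma pvIns_nil (x : Char) : pvIns x [] = [x] := rfl

lemma pvIns_cons (x y : Char) (ys : List Char) :
    pvIns x (y :: ys) = if pvKey x < pvKey y then x :: y :: ys else y :: pvIns x ys := by
  simp [pvIns, PySem.List.insertBy]

-- inserting into "zeros ++ ones": a key-0 element lands at the end of the zeros, a key-1 element at the very end
lemma pvIns_split (x : Char) (U L : List Char)
    (hU : ∀ u ∈ U, pvKey u = 0) (hL : ∀ l ∈ L, pvKey l = 1) :
    pvIns x (U ++ L) = if pvKey x = 0 then U ++ x :: L else (U ++ L) ++ [x] := by
  rcases pvKey_cases x with hx | hx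
  · rw [if_pos hx]
    induction U with
    | nil =>
      cases L with
      | nil => simp [pvIns_nil]
      | cons l ls =>
        have hl : pvKey l = 1 := hL l (by simp)
        simp [pvIns_cons, hx, hl]
    | cons u us ih =>
      have hu : pvKey u = 0 := hU u (by simp)
      rw [List.cons_append, pvIns_cons, if_neg (by omega),
          ih (fun a ha => hU a (by simp [ha]))]
      rfl
  · rw [if_neg (by omega)]
    apply PySem.List.insertBy_of_forall_not_before
    intro y hy
    rcases List.mem_append.mp hy with h | h
    · have := hU y h; simp [hx, this]
    · have := hL y h; simp [hx, this]

-- folding the insertion over cs, starting from "zeros ++ ones", appends the key-0 elements of cs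
-- to the zeros and the key-1 elements to the ones
lemma pvFold_split (cs U L : List Char)
    (hU : ∀ u ∈ U, pvKey u = 0) (hL : ∀ l ∈ L, pvKey l = 1) :
    cs.foldl (fun acc x => pvIns x acc) (U ++ L)
      = (U ++ cs.filter (fun c => pvKey c == 0)) ++ (L ++ cs.filter (fun c => pvKey c == 1)) := by
  induction cs generalizing U L with
  | nil => simp
  | cons c cs ih =>
    simp only [List.foldl_cons, List.filter_cons]
    rw [pvIns_split c U L hU hL]
    rcases pvKey_cases c with hc | hc
    · rw [if_pos hc]
      have hstep : U ++ c :: L = (U ++ [c]) ++ L := by simp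
      rw [hstep, ih (U ++ [c]) L ?_ hL]
      · simp [hc]
      · intro u hu
        rcases List.mem_append.mp hu with h | h
        · exact hU u h
        · simp at h; simp [h, hc]
    · rw [if_neg (by omega)]
      have hstep : (U ++ L) ++ [c] = U ++ (L ++ [c]) := by simp
      rw [hstep, ih U (L ++ [c]) hU ?_]
      · simp [hc]
      · intro l hl
        rcases List.mem_append.mp hl with h | h
        · exact hL l h
        · simp at h; simp [h, hc]

-- A's loop invariant: the two accumulators are the filters of the characters seen so far
lemma pvA_fold (cs : List Char) (u l : List Char) :
    cs.foldl
      (fun (acc : List Char × List Char) c =>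
        if 'A' ≤ c ∧ c ≤ 'Z' then (acc.1 ++ [c], acc.2)
        else if 'a' ≤ c ∧ c ≤ 'z' then (acc.1, acc.2 ++ [c])
        else acc)
      (u, l)
    = (u ++ cs.filter (fun c => decide ('A' ≤ c ∧ c ≤ 'Z')),
       l ++ cs.filter (fun c => decide (¬('A' ≤ c ∧ c ≤ 'Z') ∧ ('a' ≤ c ∧ c ≤ 'z')))) := by
  induction cs generalizing u l with
  | nil => simp
  | cons c cs ih =>
    simp only [List.foldl_cons, List.filter_cons]
    by_cases h1 : 'A' ≤ c ∧ c ≤ 'Z'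
    · simp [h1, ih]
    · by_cases h2 : 'a' ≤ c ∧ c ≤ 'z' <;> simp [h1, h2, ih]

-- the two sides compute the same pair of filters
lemma pv_main (s : String) : rearrangeLetters s = rearrangeLetters_alt s := by
  simp only [rearrangeLetters, rearrangeLetters_alt]
  rw [pvA_fold, PySem.List.sorted_eq_foldl_insertBy]
  have hfold := pvFold_split
      (s.toList.filter (fun c => decide ('A' ≤ c ∧ c ≤ 'Z') || decide ('a' ≤ c ∧ c ≤ 'z')))
      [] [] (by simp) (by simp)
  simp only [List.nil_append] at hfold
  unfold pvIns at hfold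
  rw [show (fun (acc : List Char) x => PySem.List.insertBy (fun a b => decide (pvKey a < pvKey b)) x acc)
        = (fun acc x => PySem.List.insertBy
            (fun a b => decide ((if 'A' ≤ a ∧ a ≤ 'Z' then (0:Int) else 1) < if 'A' ≤ b ∧ b ≤ 'Z' then (0:Int) else 1)) x acc)
      from by unfold pvKey; rfl] at hfold
  rw [hfold]
  simp only [List.filter_filter]
  congr 1
  congr 1 <;>
  · apply List.filter_congr
    intro c _
    unfold pvKey
    by_cases h1 : 'A' ≤ c ∧ c ≤ 'Z' <;> by_cases h2 : 'a' ≤ c ∧ c ≤ 'z' <;> simp [h1, h2]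

-- ===== VERDICT (by name: the statement is the Claim_ definition above) =====
theorem rearrangeLetters_spec : Claim_equal_rearrangeLetters := by
  intro s _
  exact pv_main s
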